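-- pv_equiv track=rewrite | github.com/JohnCrash/stock | jupyter/app/choose.py | minMaxLength
-- ===== SOURCE A (Python) =====
-- def minMaxLength(t):
--     minx = 9999999
--     mini = 0
--     maxx = 0
--     maxi = 0
--     for i in range(len(t)):
--         v = t[i]
--         if maxx < len(v):
--             maxx = len(v)
--             maxi = i
--         if minx > len(v):
--             minx = len(v)
--             mini = i
--     return minx,mini,maxx,maxi
-- ===== SOURCE B (Python) =====
-- def minMaxLength(t):
--     if not t:
--         return (9999999, 0, 0, 0)
--     lengths = [len(v) for v in t]
--     maxx = max(lengths)
--     maxi = lengths.index(maxx)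
--     minx = min(lengths)
--     mini = lengths.index(minx)
--     return minx, mini, maxx, maxi
-- ===== Notes on version B (the rewrite author's own statement) =====
-- stated objective: idiomatic
-- what changed: Replaces the index-driven running min/max loop with a lengths list and the built-ins max/min plus list.index (first occurrence reproduces A's strict-inequality tie-breaking), with an empty-list guard returning A's sentinel tuple.
import Mathlib
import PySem

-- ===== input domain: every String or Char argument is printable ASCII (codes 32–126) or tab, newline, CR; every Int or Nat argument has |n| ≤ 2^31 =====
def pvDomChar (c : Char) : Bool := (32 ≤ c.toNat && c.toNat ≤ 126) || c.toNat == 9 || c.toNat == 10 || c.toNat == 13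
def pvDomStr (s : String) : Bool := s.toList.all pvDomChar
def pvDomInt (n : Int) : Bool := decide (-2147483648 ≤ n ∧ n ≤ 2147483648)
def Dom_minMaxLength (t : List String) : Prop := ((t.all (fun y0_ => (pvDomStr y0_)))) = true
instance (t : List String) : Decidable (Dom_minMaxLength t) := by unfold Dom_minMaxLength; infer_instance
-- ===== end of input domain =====

-- B replaces A's index-driven running min/max loop by a lengths list consumed with
-- min/max/first-index (idiomatic decomposition; same O(n) cost).


-- ===== PORT A =====
def minMaxLength (t : List String) : Int × Int × Int × Int :=
  -- minx = 9999999; mini = 0; maxx = 0; maxi = 0; for i in range(len(t)): ...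
  (PySem.List.pyRange 0 (t.length : Int) 1).foldl
    (fun (st : Int × Int × Int × Int) (i : Int) =>
      let v := (PySem.List.pyGet? t i).getD ""   -- i ∈ range(len(t)): pyGet? is always `some`
      let n := PySem.Str.len v
      let maxp := if st.2.2.1 < n then (n, i) else (st.2.2.1, st.2.2.2)
      let minp := if st.1 > n then (n, i) else (st.1, st.2.1)
      (minp.1, minp.2, maxp.1, maxp.2))
    (9999999, 0, 0, 0)

-- ===== PORT B =====
def minMaxLength_alt (t : List String) : Int × Int × Int × Int :=
  if t = [] then (9999999, 0, 0, 0)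
  else
    let lengths := t.map (fun v => PySem.Str.len v)
    let maxx := (PySem.List.max? lengths (fun x => x)).getD 0      -- max(lengths); list nonempty → always `some`
    let maxi : Int := ((PySem.List.index? lengths maxx).getD 0 : Nat)  -- lengths.index(maxx); maxx ∈ lengths → always `some`
    let minx := (PySem.List.min? lengths (fun x => x)).getD 0
    let mini : Int := ((PySem.List.index? lengths minx).getD 0 : Nat)
    (minx, mini, maxx, maxi)

-- ===== PRECONDITION & SPEC =====
-- Pre_ excludes lists containing a string of length ≥ 9999999: A's initial minx = 9999999 acts as an
-- "infinity" sentinel, so on such inputs A's strict comparison never records the true minimum length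
-- while B reports it; everyday inputs are all admitted.
def Pre_minMaxLength (t : List String) : Prop := ∀ s ∈ t, PySem.Str.len s < 9999999
instance (t : List String) : Decidable (Pre_minMaxLength t) := by unfold Pre_minMaxLength; infer_instance
def pvWitness_minMaxLength : List String := ["ab", "", "xyz"]
def Spec_minMaxLength (t : List String) (out : Int × Int × Int × Int) : Prop := out = minMaxLength_alt t
instance (t : List String) (out : Int × Int × Int × Int) : Decidable (Spec_minMaxLength t out) := by unfold Spec_minMaxLength; infer_instance

-- ===== CLAIM (what is proved, stated in full; the proofs are below) =====
def Claim_equal_minMaxLength : Prop := ∀ (t : List String), Dom_minMaxLength t → Pre_minMaxLength t → Spec_minMaxLength t (minMaxLength t)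

-- ===== LEMMAS AND PROOFS =====

-- the loop body of A, applied to state `st` with element `s` at index `i`
def pvStep (st : Int × Int × Int × Int) (s : String) (i : Int) : Int × Int × Int × Int :=
  let n := PySem.Str.len s
  let maxp := if st.2.2.1 < n then (n, i) else (st.2.2.1, st.2.2.2)
  let minp := if st.1 > n then (n, i) else (st.1, st.2.1)
  (minp.1, minp.2, maxp.1, maxp.2)

lemma A_snoc (t : List String) (s : String) :
    minMaxLength (t ++ [s]) = pvStep (minMaxLength t) s (t.length : Int) := by
  have key : (PySem.List.pyRange 0 (t.length : Int) 1).foldl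
      (fun (st : Int × Int × Int × Int) (i : Int) =>
        let v := (PySem.List.pyGet? (t ++ [s]) i).getD ""
        let n := PySem.Str.len v
        let maxp := if st.2.2.1 < n then (n, i) else (st.2.2.1, st.2.2.2)
        let minp := if st.1 > n then (n, i) else (st.1, st.2.1)
        (minp.1, minp.2, maxp.1, maxp.2)) (9999999, 0, 0, 0) = minMaxLength t := by
    unfold minMaxLength
    apply PySem.List.foldl_congr_mem
    intro acc i hi
    obtain ⟨h0, h1⟩ := PySem.List.mem_pyRange_one.mp hi
    rw [PySem.List.pyGet?_of_nonneg _ h0, PySem.List.pyGet?_of_nonneg _ h0,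
        List.getElem?_append_left (by omega)]
  unfold minMaxLength
  rw [show (((t ++ [s]).length : Int)) = (t.length : Int) + 1 by simp,
      PySem.List.pyRange_one_succ_right (by positivity), List.foldl_append, List.foldl_cons,
      List.foldl_nil, key, PySem.List.pyGet?_append_length]
  rfl

lemma alt_snoc (t : List String) (s : String) (h : t ≠ []) :
    minMaxLength_alt (t ++ [s]) = pvStep (minMaxLength_alt t) s (t.length : Int) := by
  obtain ⟨c, t', rfl⟩ := List.exists_cons_of_ne_nil h
  set n := PySem.Str.len s with hn
  set x := PySem.Str.len c with hx
  set l := t'.map (fun v => PySem.Str.len v) with hl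
  set M := List.foldl max x l with hM
  set m := List.foldl min x l with hm
  have hmax : PySem.List.max? (x :: l) (fun y => y) = some M := PySem.List.max?_id_cons x l
  have hmin : PySem.List.min? (x :: l) (fun y => y) = some m := PySem.List.min?_id_cons x l
  have hmax' : PySem.List.max? (x :: (l ++ [n])) (fun y => y) = some (max M n) := by
    rw [PySem.List.max?_id_cons x (l ++ [n]), List.foldl_append]; rfl
  have hmin' : PySem.List.min? (x :: (l ++ [n])) (fun y => y) = some (min m n) := by
    rw [PySem.List.min?_id_cons x (l ++ [n]), List.foldl_append]; rfl
  have hleM : ∀ y ∈ x :: l, y ≤ M := PySem.List.max?_isMax hmax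
  have hmle : ∀ y ∈ x :: l, m ≤ y := PySem.List.min?_isMin hmin
  have hMmem : M ∈ x :: l := PySem.List.max?_mem hmax
  have hmmem : m ∈ x :: l := PySem.List.min?_mem hmin
  have hmapt : (c :: t').map (fun v => PySem.Str.len v) = x :: l := by simp [hx, hl]
  have hmaps : (c :: (t' ++ [s])).map (fun v => PySem.Str.len v) = x :: (l ++ [n]) := by
    simp [hx, hl, hn]
  have hidxM : PySem.List.index? (x :: (l ++ [n])) M = PySem.List.index? (x :: l) M := by
    rw [← List.cons_append]; exact PySem.List.index?_append_of_mem _ hMmem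
  have hidxm : PySem.List.index? (x :: (l ++ [n])) m = PySem.List.index? (x :: l) m := by
    rw [← List.cons_append]; exact PySem.List.index?_append_of_mem _ hmmem
  clear_value n x l M m
  unfold minMaxLength_alt pvStep
  rw [if_neg (by simp), if_neg (by simp)]
  dsimp only
  rw [(hn.symm : PySem.Str.len s = n)]
  simp only [hmapt, hmaps, List.cons_append, hmax, hmin, hmax', hmin', Option.getD_some]
  by_cases hc1 : M < n
  · have hnmem : n ∉ (x :: l) := fun hmem => absurd (hleM n hmem) (by omega)
    have hidxn : PySem.List.index? (x :: (l ++ [n])) n = some (x :: l).length := by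
      rw [← List.cons_append]; exact PySem.List.index?_append_singleton_self _ _ hnmem
    have hMn : max M n = n := max_eq_right hc1.le
    by_cases hc2 : m > n
    · have hmn : min m n = n := min_eq_right hc2.le
      simp only [hMn, hmn, hidxn, Option.getD_some]
      simp [hc1, hc2, hl]
    · have hmn : min m n = m := min_eq_left (by omega)
      simp only [hMn, hmn, hidxn, hidxm, Option.getD_some]
      simp [hc1, hc2, hl]
  · have hMn : max M n = M := max_eq_left (by omega)
    by_cases hc2 : m > n
    · have hnmem : n ∉ (x :: l) := fun hmem => absurd (hmle n hmem) (by omega)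
      have hidxn : PySem.List.index? (x :: (l ++ [n])) n = some (x :: l).length := by
        rw [← List.cons_append]; exact PySem.List.index?_append_singleton_self _ _ hnmem
      have hmn : min m n = n := min_eq_right hc2.le
      simp only [hMn, hmn, hidxn, hidxM, Option.getD_some]
      simp [hc1, hc2, hl]
    · have hmn : min m n = m := min_eq_left (by omega)
      simp only [hMn, hmn, hidxM, hidxm]
      simp [hc1, hc2]

lemma A_singleton (s : String) (h : PySem.Str.len s < 9999999) :
    minMaxLength [s] = (PySem.Str.len s, 0, PySem.Str.len s, 0) := by
  have hn : (0:Int) ≤ PySem.Str.len s := by simp [PySem.Str.len_eq]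
  unfold minMaxLength
  rw [show ((([s]:List String).length : Int)) = 0 + 1 by simp,
      PySem.List.pyRange_one_singleton]
  simp only [List.foldl_cons, List.foldl_nil, PySem.List.pyGet?_zero_cons, Option.getD_some]
  split_ifs with h1 h2 h3 <;> simp_all

lemma alt_singleton (s : String) :
    minMaxLength_alt [s] = (PySem.Str.len s, 0, PySem.Str.len s, 0) := by
  simp [minMaxLength_alt, PySem.List.max?_id_cons, PySem.List.min?_id_cons]

lemma pv_main (t : List String) (ht : t ≠ []) (hp : Pre_minMaxLength t) :
    minMaxLength t = minMaxLength_alt t := by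
  induction t using List.reverseRecOn with
  | nil => exact absurd rfl ht
  | append_singleton t' s ih =>
    rcases List.eq_nil_or_concat t' with h | ⟨u, v, rfl⟩
    · subst h
      rw [List.nil_append, A_singleton s (hp s (by simp)), alt_singleton]
    · rw [List.concat_eq_append] at *
      rw [A_snoc, alt_snoc _ _ (by simp), ih (by simp) (fun x hx => hp x (by simp at hx ⊢; tauto))]

-- ===== VERDICT (by name: the statement is the Claim_ definition above) =====
theorem minMaxLength_spec : Claim_equal_minMaxLength := by
  intro t _ hp
  unfold Spec_minMaxLength
  rcases List.eq_nil_or_concat t with h | ⟨t', s, rfl⟩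
  · subst h; rfl
  · exact pv_main _ (by simp) hp
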